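-- pv_equiv track=rewrite | github.com/SungHwanYun/Coding-Test-in-One-Volume-with-Python-book- | 5-3-2.py | solution
-- ===== SOURCE A (Python) =====
-- def solution(n, k):
--     a = 0
--     while n > 0:
--         d = n % k
--         n = n // k
--         a += d
--
--     b = ''
--     while a > 0:
--         d = a % k
--         a = a // k
--         b += str(d)
--     ret = b[::-1]
--
--     return int(ret)
-- ===== SOURCE B (Python) =====
-- # Different decomposition: build the explicit base-k digit list recursively,
-- # sum it, and render the result's digit list most-significant-first with join.
-- def solution(n, k):
--     def digits(m):
--         return [] if m <= 0 else [m % k] + digits(m // k)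
--
--     a = sum(digits(n))
--     return int(''.join(str(d) for d in reversed(digits(a))))
-- ===== Notes on version B (the rewrite author's own statement) =====
-- stated objective: alternative
-- what changed: Replaces A's two while-loops with mutable accumulators and a final whole-string reversal by one recursive helper producing the explicit base-k digit list, a sum over that list, and a join over the reversed digit list; Pre_ restricts to the task's natural domain 2 <= k <= 10, because for k > 10 a base-k digit needs several decimal characters, the decimal re-encoding is ambiguous, and A's character-wise reversal of the whole accumulated string scrambles those multi-digit chunks.
-- outside the precondition, e.g. on solution(12, 50): A returns 21, B returns 12
import Mathlib
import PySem

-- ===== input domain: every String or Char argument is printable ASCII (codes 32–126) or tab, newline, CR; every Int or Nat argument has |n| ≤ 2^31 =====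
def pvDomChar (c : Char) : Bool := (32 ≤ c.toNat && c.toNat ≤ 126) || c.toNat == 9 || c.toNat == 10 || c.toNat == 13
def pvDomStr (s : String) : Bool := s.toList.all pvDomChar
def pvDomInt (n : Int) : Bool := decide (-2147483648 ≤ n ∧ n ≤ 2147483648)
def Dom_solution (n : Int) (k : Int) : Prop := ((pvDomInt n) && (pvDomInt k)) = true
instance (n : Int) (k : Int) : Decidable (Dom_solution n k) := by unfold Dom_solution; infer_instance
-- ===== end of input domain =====

-- B replaces A's two accumulator while-loops + whole-string reverse by an explicit
-- recursive base-k digit list, a sum over it, and a most-significant-first join;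
-- equal on the natural domain 2 ≤ k ≤ 10 (see Pre_); no speed claim.

-- ===== PORT A =====
-- first while loop: a = sum of base-k digits of n (fuel totalizes the loop;
-- n.toNat+1 iterations always suffice on Pre_).
def solA_loop1 : Nat → Int → Int → Int → Int
  | 0, _, _, a => a
  | f + 1, n, k, a =>
      if n > 0 then solA_loop1 f (PySem.Int.floordiv n k) k (a + PySem.Int.mod n k) else a

-- second while loop: b += str(d), b as List Char
def solA_loop2 : Nat → Int → Int → List Char → List Char
  | 0, _, _, b => b
  | f + 1, a, k, b =>
      if a > 0 then solA_loop2 f (PySem.Int.floordiv a k) k (b ++ PySem.Int.toChars (PySem.Int.mod a k)) else b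

def solution (n : Int) (k : Int) : Int :=
  let a := solA_loop1 (n.toNat + 1) n k 0
  let b := solA_loop2 (a.toNat + 1) a k []
  -- ret = b[::-1] is b.reverse; int(ret): ofChars? is none exactly where Python
  -- raises ValueError (excluded by Pre_)
  (PySem.Int.ofChars? b.reverse).getD 0

-- ===== PORT B =====
-- digits(m) = [] if m <= 0 else [m % k] + digits(m // k)   (fuel totalizes the recursion)
def solB_digits : Nat → Int → Int → List Int
  | 0, _, _ => []
  | f + 1, m, k =>
      if m ≤ 0 then [] else PySem.Int.mod m k :: solB_digits f (PySem.Int.floordiv m k) k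

def solution_alt (n : Int) (k : Int) : Int :=
  let a := (solB_digits (n.toNat + 1) n k).sum
  -- ''.join(str(d) for d in reversed(digits(a)))
  let cs := ((solB_digits (a.toNat + 1) a k).reverse.map PySem.Int.toChars).flatten
  (PySem.Int.ofChars? cs).getD 0

-- ===== PRECONDITION & SPEC =====
-- Pre_ keeps the task's natural domain: bases whose digits are single decimal
-- characters (2 ≤ k ≤ 10).  It excludes n ≤ 0 and k < 2, where A raises
-- (int('') ValueError, k = 0 ZeroDivisionError) or loops forever (k = 1), and
-- k > 10, where the decimal re-encoding of base-k digits is ambiguous and A's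
-- character-wise reversal of the whole accumulated string scrambles multi-digit
-- chunks (an artefact of the accumulation; e.g. n=12, k=50: A returns 21, B 12).
def Pre_solution (n : Int) (k : Int) : Prop := 0 < n ∧ 2 ≤ k ∧ k ≤ 10
instance (n : Int) (k : Int) : Decidable (Pre_solution n k) := by unfold Pre_solution; infer_instance
def pvWitness_solution : Int × Int := (5, 2)

def Spec_solution (n : Int) (k : Int) (out : Int) : Prop := out = solution_alt n k
instance (n : Int) (k : Int) (out : Int) : Decidable (Spec_solution n k out) := by unfold Spec_solution; infer_instance

-- ===== CLAIM (what is proved, stated in full; the proofs are below) =====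
def Claim_equal_solution : Prop := ∀ (n : Int) (k : Int), Dom_solution n k → Pre_solution n k → Spec_solution n k (solution n k)

-- ===== LEMMAS AND PROOFS =====
theorem loop1_eq_sum_digits (f : Nat) : ∀ (n k a : Int),
    solA_loop1 f n k a = a + (solB_digits f n k).sum := by
  induction f with
  | zero => intro n k a; simp [solA_loop1, solB_digits]
  | succ f ih =>
      intro n k a
      by_cases h : n > 0
      · simp only [solA_loop1, solB_digits, if_pos h, if_neg (by omega : ¬ n ≤ 0), List.sum_cons]
        rw [ih]; ring
      · simp only [solA_loop1, solB_digits, if_neg h, if_pos (by omega : n ≤ 0), List.sum_nil]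
        ring

-- a single decimal digit's string is one character, so reversing it is the identity
theorem toChars_digit_reverse (d : Int) (h0 : 0 ≤ d) (h9 : d < 10) :
    (PySem.Int.toChars d).reverse = PySem.Int.toChars d := by
  interval_cases d <;> decide

theorem loop2_reverse_eq_join (f : Nat) (k : Int) (hk2 : 2 ≤ k) (hk10 : k ≤ 10) :
    ∀ (a : Int) (b : List Char),
    (solA_loop2 f a k b).reverse
      = ((solB_digits f a k).reverse.map PySem.Int.toChars).flatten ++ b.reverse := by
  induction f with
  | zero => intro a b; simp [solA_loop2, solB_digits]
  | succ f ih =>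
      intro a b
      by_cases h : a > 0
      · simp only [solA_loop2, solB_digits, if_pos h, if_neg (by omega : ¬ a ≤ 0)]
        rw [ih, List.reverse_cons, List.map_append, List.flatten_append]
        have hd := toChars_digit_reverse (PySem.Int.mod a k)
          (PySem.Int.mod_nonneg a (by omega)) (by have := PySem.Int.mod_lt a (b := k) (by omega); omega)
        simp [hd, List.append_assoc]
      · simp only [solA_loop2, solB_digits, if_neg h, if_pos (by omega : a ≤ 0)]
        simp

-- ===== VERDICT (by name: the statement is the Claim_ definition above) =====
theorem solution_spec : Claim_equal_solution := by
  intro n k _ hpre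
  obtain ⟨-, hk2, hk10⟩ := hpre
  unfold Spec_solution solution solution_alt
  have h1 : solA_loop1 (n.toNat + 1) n k 0 = (solB_digits (n.toNat + 1) n k).sum := by
    rw [loop1_eq_sum_digits]; ring
  rw [h1]
  simp only [loop2_reverse_eq_join _ k hk2 hk10, List.reverse_nil, List.append_nil]
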